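-- pv_equiv track=rewrite | github.com/dropbox/dbx_build_tools | build_tools/py/bazel_validation/bazel_deps.py | flatten_provides
-- ===== SOURCE A (Python) =====
-- from typing import List, Mapping, MutableMapping, NamedTuple, Set, Tuple
--
-- class AmbiguousModuleException(Exception):
--     pass
--
-- def flatten_provides(
--     primary_target: str, target_provides: List[Tuple[str, str]]
-- ) -> Mapping[str, str]:
--     provides_map = {}  # type: MutableMapping[str, str]
--     for target, provides in target_provides:
--         if target != primary_target:
--             # we only allow conflicts with the actual target (often the cause for dbx_py_binary with main
--             # which is in some library)
--             if provides in provides_map: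
--                 raise AmbiguousModuleException(
--                     "More than one dependency provides the module {}".format(provides)
--                 )
--             assert provides not in provides_map
--             provides_map[provides] = target
--
--     # Ensure that the main target provides its sources directly by overriding it in a separate path
--     for target, provides in target_provides:
--         if target == primary_target:
--             provides_map[provides] = target
--
--     return provides_map
-- ===== SOURCE B (Python) =====
-- class AmbiguousModuleException(Exception):
--     pass
--
--
-- def flatten_provides(primary_target, target_provides):
--     # Single pass splitting the input: ordered distinct primary-provided modules,
--     # and the non-primary (module, target) pairs in order.
--     primary_keys = []
--     non_primary = []
--     for target, provides in target_provides:
--         if target == primary_target: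
--             if provides not in primary_keys:
--                 primary_keys.append(provides)
--         else:
--             non_primary.append((provides, target))
--     np_keys = [p for p, _ in non_primary]
--     if len(set(np_keys)) != len(np_keys):
--         raise AmbiguousModuleException(
--             "More than one dependency provides the same module"
--         )
--     # Non-primary modules keep their position; a module also provided by the
--     # primary target gets the primary target as its value. Primary-only modules
--     # are appended afterwards.
--     result = {p: (primary_target if p in primary_keys else t) for p, t in non_primary}
--     for p in primary_keys:
--         if p not in result:
--             result[p] = primary_target
--     return result
-- ===== Notes on version B (the rewrite author's own statement) =====
-- stated objective: alternative
-- what changed: A makes two filtered passes over the input and relies on dict overwrite-in-place for the primary override; B makes one pass that partitions the input into an ordered set of primary-provided modules and the non-primary pairs, checks ambiguity by a set-cardinality comparison, and then builds the map directly with each value chosen up front (primary wins) plus the primary-only modules appended.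
import Mathlib
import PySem

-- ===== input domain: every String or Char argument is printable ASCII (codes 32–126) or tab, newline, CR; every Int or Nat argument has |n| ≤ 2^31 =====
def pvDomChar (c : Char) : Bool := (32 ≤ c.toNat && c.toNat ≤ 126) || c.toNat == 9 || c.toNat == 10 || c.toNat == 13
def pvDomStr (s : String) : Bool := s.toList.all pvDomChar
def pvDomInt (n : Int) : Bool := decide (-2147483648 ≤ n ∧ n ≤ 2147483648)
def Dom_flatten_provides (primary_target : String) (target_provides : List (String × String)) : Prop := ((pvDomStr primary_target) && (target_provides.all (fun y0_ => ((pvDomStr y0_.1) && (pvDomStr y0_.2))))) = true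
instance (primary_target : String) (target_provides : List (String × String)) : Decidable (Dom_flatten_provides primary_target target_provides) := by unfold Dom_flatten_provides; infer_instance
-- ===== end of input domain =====

-- B replaces A's two filtered passes + dict overwrite by a single partitioning pass,
-- a set-cardinality ambiguity check, and a direct construction of the map (alternative decomposition).


-- ===== PORT A =====
def flatten_provides (primary_target : String) (target_provides : List (String × String)) : List (String × String) :=
  let m1 : PySem.Dict String String := target_provides.foldl (fun m tp =>
    if tp.1 ≠ primary_target then
      if m.contains tp.2 then m  -- raise AmbiguousModuleException: excluded by Pre_
      else m.insert tp.2 tp.1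
    else m) PySem.Dict.empty
  let m2 : PySem.Dict String String := target_provides.foldl (fun m tp =>
    if tp.1 = primary_target then m.insert tp.2 tp.1 else m) m1
  m2.items

-- ===== PORT B =====
def flatten_provides_alt (primary_target : String) (target_provides : List (String × String)) : List (String × String) :=
  let acc := target_provides.foldl (fun (acc : PySem.Set String × List (String × String)) tp =>
    if tp.1 = primary_target then (PySem.Set.add acc.1 tp.2, acc.2)
    else (acc.1, acc.2 ++ [(tp.2, tp.1)])) (PySem.Set.empty, [])
  let primary_keys := acc.1
  let non_primary := acc.2
  let np_keys := non_primary.map Prod.fst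
  if (PySem.Set.ofList np_keys).length ≠ np_keys.length then
    []  -- raise AmbiguousModuleException: excluded by Pre_
  else
    let result := non_primary.foldl (fun (d : PySem.Dict String String) pt =>
      d.insert pt.1 (if pt.1 ∈ primary_keys then primary_target else pt.2)) PySem.Dict.empty
    let result2 := primary_keys.foldl (fun (d : PySem.Dict String String) p =>
      if d.contains p then d else d.insert p primary_target) result
    result2.items

-- ===== PRECONDITION & SPEC =====
-- Pre_ excludes exactly the inputs on which A raises AmbiguousModuleException:
-- two non-primary entries providing the same module.
def Pre_flatten_provides (primary_target : String) (target_provides : List (String × String)) : Prop :=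
  ((target_provides.filter (fun tp => tp.1 ≠ primary_target)).map Prod.snd).Nodup
instance (primary_target : String) (target_provides : List (String × String)) : Decidable (Pre_flatten_provides primary_target target_provides) := by unfold Pre_flatten_provides; infer_instance
def pvWitness_flatten_provides : String × (List (String × String)) := ("a", [("b", "m"), ("a", "m"), ("a", "k")])
def Spec_flatten_provides (primary_target : String) (target_provides : List (String × String)) (out : List (String × String)) : Prop := out = flatten_provides_alt primary_target target_provides
instance (primary_target : String) (target_provides : List (String × String)) (out : List (String × String)) : Decidable (Spec_flatten_provides primary_target target_provides out) := by unfold Spec_flatten_provides; infer_instance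

-- ===== CLAIM (what is proved, stated in full; the proofs are below) =====
def Claim_equal_flatten_provides : Prop := ∀ (primary_target : String) (target_provides : List (String × String)), Dom_flatten_provides primary_target target_provides → Pre_flatten_provides primary_target target_provides → Spec_flatten_provides primary_target target_provides (flatten_provides primary_target target_provides)

-- ===== LEMMAS AND PROOFS =====

-- list-level shadow of PySem.Dict.insert on the items list
def insL (l : List (String × String)) (k v : String) : List (String × String) :=
  if k ∈ l.map Prod.fst then l.map (fun p => if p.1 = k then (k, v) else p) else l ++ [(k, v)]

-- a fold over dicts is the corresponding fold over their items lists
lemma items_foldl_gen {α : Type} (L : List α) (G : PySem.Dict String String → α → PySem.Dict String String)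
    (g : List (String × String) → α → List (String × String))
    (h : ∀ d x, (G d x).items = g d.items x) :
    ∀ d, (L.foldl G d).items = L.foldl g d.items := by
  induction L with
  | nil => intro d; rfl
  | cons x L ih => intro d; rw [List.foldl_cons, List.foldl_cons, ih, h]

lemma contains_iff_mem_items_fst (d : PySem.Dict String String) (k : String) :
    d.contains k = true ↔ k ∈ d.items.map Prod.fst := by
  rw [PySem.Dict.contains_iff_mem_keys]; simp [PySem.Dict.keys]

lemma items_insert_insL (d : PySem.Dict String String) (k v : String) :
    (d.insert k v).items = insL d.items k v := by
  unfold insL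
  by_cases h : k ∈ d.items.map Prod.fst
  · have hc : d.contains k = true := (contains_iff_mem_items_fst d k).mpr h
    rw [PySem.Dict.items_insert, hc, if_pos h]
    simp only [if_true]
    apply List.map_congr_left; intro p _
    by_cases hp : p.1 = k <;> simp [hp]
  · have hc : d.contains k = false := by
      rcases Bool.eq_false_or_eq_true (d.contains k) with h' | h'
      · exact absurd ((contains_iff_mem_items_fst d k).mp h') h
      · exact h'
    rw [PySem.Dict.items_insert, hc, if_neg h]
    simp only [Bool.false_eq_true, if_false]

-- a conditional fold is a fold over the filtered, mapped list
lemma foldl_filter_map {α β γ : Type} (p : α → Prop) [DecidablePred p] (f : α → β) (g : γ → β → γ)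
    (tps : List α) : ∀ init, tps.foldl (fun s x => if p x then g s (f x) else s) init
      = ((tps.filter (fun x => decide (p x))).map f).foldl g init := by
  induction tps with
  | nil => intro init; rfl
  | cons x tps ih => intro init; by_cases h : p x <;> simp [h, ih]

-- B's single pass with a pair accumulator is its two component folds
lemma foldl_pair_split (P : String) (tps : List (String × String)) :
    ∀ (s : PySem.Set String) (l : List (String × String)),
    tps.foldl (fun acc tp => if tp.1 = P then (PySem.Set.add acc.1 tp.2, acc.2)
      else (acc.1, acc.2 ++ [(tp.2, tp.1)])) (s, l)
      = (tps.foldl (fun s tp => if tp.1 = P then PySem.Set.add s tp.2 else s) s,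
         tps.foldl (fun l tp => if tp.1 = P then l else l ++ [(tp.2, tp.1)]) l) := by
  induction tps with
  | nil => intro s l; rfl
  | cons tp tps ih => intro s l; by_cases h : tp.1 = P <;> simp [h, ih]

-- inserting a fresh-keyed pair list appends it, with the chosen values
lemma foldl_insL_fresh (v : String × String → String) (np : List (String × String)) :
    ∀ l : List (String × String), (l.map Prod.fst ++ np.map Prod.fst).Nodup →
      np.foldl (fun l pr => insL l pr.1 (v pr)) l = l ++ np.map (fun pr => (pr.1, v pr)) := by
  induction np with
  | nil => intro l _; simp
  | cons pr np ih =>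
    intro l hn
    have hfresh : pr.1 ∉ l.map Prod.fst := by
      intro hmem
      exact (List.disjoint_of_nodup_append hn) hmem (by simp)
    have hstep : insL l pr.1 (v pr) = l ++ [(pr.1, v pr)] := by
      unfold insL; rw [if_neg hfresh]
    rw [List.foldl_cons, hstep, ih (l ++ [(pr.1, v pr)]) (by
      simp only [List.map_append, List.map_cons, List.map_nil] at hn ⊢
      simpa [List.append_assoc] using hn), List.append_assoc]
    simp

-- A's first pass (membership check, then append) on fresh keys also appends
lemma foldl_fresh_append (np : List (String × String)) :
    ∀ l : List (String × String), (l.map Prod.fst ++ np.map Prod.fst).Nodup →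
      np.foldl (fun l pr => if pr.1 ∈ l.map Prod.fst then l else l ++ [pr]) l = l ++ np := by
  induction np with
  | nil => intro l _; simp
  | cons pr np ih =>
    intro l hn
    have hfresh : pr.1 ∉ l.map Prod.fst := by
      intro hmem
      exact (List.disjoint_of_nodup_append hn) hmem (by simp)
    rw [List.foldl_cons, if_neg hfresh, ih (l ++ [pr]) (by
      simp only [List.map_append, List.map_cons, List.map_nil] at hn ⊢
      simpa [List.append_assoc] using hn), List.append_assoc]
    simp

-- A's override pass: keys already present are overwritten in place, new distinct keys append
lemma foldl_insL_const (P : String) (ks : List String) :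
    ∀ l : List (String × String),
    ks.foldl (fun l k => insL l k P) l
      = l.map (fun p => if p.1 ∈ ks then (p.1, P) else p)
        ++ ((PySem.Set.ofList ks).filter (fun k => decide (k ∉ l.map Prod.fst))).map
            (fun k => (k, P)) := by
  induction ks with
  | nil => simp [PySem.Set.ofList_nil]
  | cons k ks ih =>
    intro l
    rw [List.foldl_cons, ih (insL l k P), PySem.Set.ofList_cons]
    have hdis : PySem.Set.discard (PySem.Set.ofList ks) k
        = (PySem.Set.ofList ks).filter (fun j => !(j == k)) := by
      simp [PySem.Set.discard]
    by_cases h : k ∈ l.map Prod.fst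
    · have hins : insL l k P = l.map (fun p => if p.1 = k then (k, P) else p) := by
        unfold insL; rw [if_pos h]
      have hkeys : (l.map (fun p => if p.1 = k then (k, P) else p)).map Prod.fst
          = l.map Prod.fst := by
        rw [List.map_map]; apply List.map_congr_left; intro p _
        by_cases hp : p.1 = k <;> simp [hp]
      rw [hins, hkeys, List.map_map]
      congr 1
      · apply List.map_congr_left; intro p _
        by_cases hp : p.1 = k <;> by_cases hm : p.1 ∈ ks <;>
          simp [hp, hm, Function.comp]
      · rw [hdis, List.filter_cons, List.filter_filter]
        have hk : (decide (k ∉ List.map Prod.fst l)) = false := by simp [h]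
        rw [hk]
        simp only [Bool.false_eq_true, if_false]
        congr 1
        apply List.filter_congr
        intro j _
        by_cases hj : j = k
        · subst hj; simp [h]
        · simp [hj]
    · have hins : insL l k P = l ++ [(k, P)] := by unfold insL; rw [if_neg h]
      rw [hins, List.map_append, hdis, List.filter_cons]
      have hk : (decide (k ∉ List.map Prod.fst l)) = true := by simp [h]
      rw [hk]
      simp only [if_true, List.map_cons]
      have hkeys : (l ++ [(k, P)]).map Prod.fst = l.map Prod.fst ++ [k] := by simp
      rw [hkeys]
      have hmapl : l.map (fun p => if p.1 ∈ ks then (p.1, P) else p)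
          = l.map (fun p => if p.1 ∈ k :: ks then (p.1, P) else p) := by
        apply List.map_congr_left; intro p hp
        have hpk : p.1 ≠ k := by
          intro e; exact h (e ▸ List.mem_map_of_mem hp)
        by_cases hm : p.1 ∈ ks <;> simp [hm, hpk]
      have hfilt : (PySem.Set.ofList ks).filter
            (fun j => decide (j ∉ List.map Prod.fst l ++ [k]))
          = ((PySem.Set.ofList ks).filter (fun j => !(j == k))).filter
            (fun j => decide (j ∉ List.map Prod.fst l)) := by
        rw [List.filter_filter]
        apply List.filter_congr
        intro j _
        by_cases hj : j = k
        · subst hj; simp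
        · rw [show (j == k) = false from beq_eq_false_iff_ne.mpr hj]
          simp [List.mem_append, hj]
      rw [hfilt, hmapl]
      simp [List.append_assoc]

-- B's second pass: skip present keys, append absent ones
lemma foldl_skip_or_append (P : String) (ks : List String) :
    ∀ l : List (String × String), ks.Nodup →
      ks.foldl (fun l k => if k ∈ l.map Prod.fst then l else l ++ [(k, P)]) l
      = l ++ (ks.filter (fun k => decide (k ∉ l.map Prod.fst))).map (fun k => (k, P)) := by
  induction ks with
  | nil => intro l _; simp
  | cons k ks ih =>
    intro l hn
    rw [List.foldl_cons]
    by_cases h : k ∈ l.map Prod.fst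
    · rw [if_pos h, ih l hn.of_cons]
      simp [h]
    · rw [if_neg h, ih (l ++ [(k, P)]) hn.of_cons]
      have : ∀ j ∈ ks, (decide (j ∉ (l ++ [(k, P)]).map Prod.fst)) = (decide (j ∉ l.map Prod.fst)) := by
        intro j hj
        have hjk : j ≠ k := by rintro rfl; exact (List.nodup_cons.mp hn).1 hj
        simp [hjk]
      rw [List.filter_congr this]
      simp [h]

theorem flatten_provides_spec : Claim_equal_flatten_provides := by
  intro P tps _ hpre
  unfold Pre_flatten_provides at hpre
  unfold Spec_flatten_provides flatten_provides flatten_provides_alt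
  simp only []
  -- shared abbreviations
  have hnpfst : ((tps.filter (fun tp => decide (tp.1 ≠ P))).map
      (fun tp => ((tp.2, tp.1) : String × String))).map Prod.fst
      = (tps.filter (fun tp => decide (tp.1 ≠ P))).map Prod.snd := by
    rw [List.map_map]; rfl
  -- ===== A side =====
  have hA1 : (tps.foldl (fun m tp =>
      if tp.1 ≠ P then (if m.contains tp.2 then m else m.insert tp.2 tp.1) else m)
      (PySem.Dict.empty : PySem.Dict String String)).items
      = tps.foldl (fun l tp =>
          if tp.1 ≠ P then (if tp.2 ∈ l.map Prod.fst then l else l ++ [(tp.2, tp.1)]) else l)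
        [] := by
    apply items_foldl_gen
    intro d tp
    by_cases hp : tp.1 ≠ P
    · by_cases hc : d.contains tp.2 = true
      · simp [hp, hc, (contains_iff_mem_items_fst d tp.2).mp hc]
      · have hm : tp.2 ∉ d.items.map Prod.fst := fun hm =>
          hc ((contains_iff_mem_items_fst d tp.2).mpr hm)
        simp [hp, hc, hm, items_insert_insL, insL]
    · simp [hp]
  have hA1' : tps.foldl (fun l tp =>
        if tp.1 ≠ P then (if tp.2 ∈ l.map Prod.fst then l else l ++ [(tp.2, tp.1)]) else l) []
      = (tps.filter (fun tp => decide (tp.1 ≠ P))).map (fun tp => (tp.2, tp.1)) := by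
    rw [foldl_filter_map (p := fun tp => tp.1 ≠ P) (f := fun tp => ((tp.2, tp.1) : String × String))
        (g := fun l pr => if pr.1 ∈ l.map Prod.fst then l else l ++ [pr]) tps []]
    rw [foldl_fresh_append _ [] (by simpa [hnpfst] using hpre)]
    simp
  -- A's override pass
  have hA2 : ∀ (m : PySem.Dict String String),
      (tps.foldl (fun m tp => if tp.1 = P then m.insert tp.2 tp.1 else m) m).items
      = tps.foldl (fun l tp => if tp.1 = P then insL l tp.2 tp.1 else l) m.items := by
    intro m
    apply items_foldl_gen
    intro d tp
    by_cases hp : tp.1 = P <;> simp [hp, items_insert_insL]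
  have hA2' : ∀ l : List (String × String),
      tps.foldl (fun l tp => if tp.1 = P then insL l tp.2 tp.1 else l) l
      = ((tps.filter (fun tp => decide (tp.1 = P))).map Prod.snd).foldl
          (fun l k => insL l k P) l := by
    intro l
    rw [foldl_filter_map (p := fun tp => tp.1 = P)
        (f := fun tp => ((tp.2, tp.1) : String × String))
        (g := fun l pr => insL l pr.1 pr.2) tps l]
    rw [PySem.List.foldl_congr_mem _ _ (fun l (pr : String × String) => insL l pr.1 P) l (by
      intro acc pr hpr
      rcases List.mem_map.mp hpr with ⟨tp, htp, rfl⟩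
      have : tp.1 = P := by simpa using (List.mem_filter.mp htp).2
      simp [this])]
    rw [show ((tps.filter (fun tp => decide (tp.1 = P))).map
          (fun tp => ((tp.2, tp.1) : String × String))).foldl
          (fun l (pr : String × String) => insL l pr.1 P) l
        = (((tps.filter (fun tp => decide (tp.1 = P))).map
            (fun tp => ((tp.2, tp.1) : String × String))).map Prod.fst).foldl
          (fun l k => insL l k P) l from by simp [List.foldl_map]]
    rw [List.map_map]
    rfl
  -- B's single partitioning pass
  rw [foldl_pair_split P tps PySem.Set.empty []]
  simp only []
  have hc2 : tps.foldl (fun l tp =>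
        if tp.1 = P then l else l ++ [((tp.2, tp.1) : String × String)]) []
      = (tps.filter (fun tp => decide (tp.1 ≠ P))).map (fun tp => (tp.2, tp.1)) := by
    rw [show (fun (l : List (String × String)) (tp : String × String) =>
          if tp.1 = P then l else l ++ [((tp.2, tp.1) : String × String)])
        = (fun (l : List (String × String)) (tp : String × String) =>
          if tp.1 ≠ P then l ++ [((tp.2, tp.1) : String × String)] else l) from by
      funext l tp; by_cases h : tp.1 = P <;> simp [h]]
    rw [foldl_filter_map (p := fun tp => tp.1 ≠ P)
        (f := fun tp => ((tp.2, tp.1) : String × String))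
        (g := fun l pr => l ++ [pr]) tps []]
    rw [PySem.List.foldl_append_singleton]
    simp
  have hc1 : tps.foldl (fun s tp => if tp.1 = P then PySem.Set.add s tp.2 else s)
        PySem.Set.empty
      = PySem.Set.ofList ((tps.filter (fun tp => decide (tp.1 = P))).map Prod.snd) := by
    rw [foldl_filter_map (p := fun tp => tp.1 = P) (f := Prod.snd)
        (g := PySem.Set.add) tps PySem.Set.empty]
    rw [PySem.Set.ofList_eq_foldl]
    rfl
  rw [hc1, hc2, hnpfst]
  rw [PySem.Set.ofList_eq_self_of_nodup _ hpre]
  rw [if_neg (by simp)]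
  rw [hA2, hA1, hA1', hA2', foldl_insL_const]
  -- B's direct construction
  have hB2 : ∀ (m : PySem.Dict String String),
      ((PySem.Set.ofList ((tps.filter (fun tp => decide (tp.1 = P))).map Prod.snd)).foldl
        (fun d p => if d.contains p = true then d else d.insert p P) m).items
      = (PySem.Set.ofList ((tps.filter (fun tp => decide (tp.1 = P))).map Prod.snd)).foldl
        (fun l p => if p ∈ l.map Prod.fst then l else l ++ [(p, P)]) m.items := by
    intro m
    apply items_foldl_gen
    intro d p
    by_cases hc : d.contains p = true
    · simp [hc, (contains_iff_mem_items_fst d p).mp hc]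
    · have hm : p ∉ d.items.map Prod.fst := fun hm =>
        hc ((contains_iff_mem_items_fst d p).mpr hm)
      simp [hc, hm, items_insert_insL, insL]
  rw [hB2]
  have hB1 : (((tps.filter (fun tp => decide (tp.1 ≠ P))).map (fun tp => (tp.2, tp.1))).foldl
        (fun d pt => d.insert pt.1
          (if pt.1 ∈ PySem.Set.ofList ((tps.filter (fun tp => decide (tp.1 = P))).map Prod.snd)
           then P else pt.2))
        (PySem.Dict.empty : PySem.Dict String String)).items
      = ((tps.filter (fun tp => decide (tp.1 ≠ P))).map (fun tp => (tp.2, tp.1))).map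
          (fun pt => (pt.1,
            if pt.1 ∈ PySem.Set.ofList ((tps.filter (fun tp => decide (tp.1 = P))).map Prod.snd)
            then P else pt.2)) := by
    have hbridge := items_foldl_gen
        (L := (tps.filter (fun tp => decide (tp.1 ≠ P))).map (fun tp => (tp.2, tp.1)))
        (G := fun (d : PySem.Dict String String) (pt : String × String) => d.insert pt.1
          (if pt.1 ∈ PySem.Set.ofList ((tps.filter (fun tp => decide (tp.1 = P))).map Prod.snd)
           then P else pt.2))
        (g := fun (l : List (String × String)) (pt : String × String) => insL l pt.1
          (if pt.1 ∈ PySem.Set.ofList ((tps.filter (fun tp => decide (tp.1 = P))).map Prod.snd)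
           then P else pt.2))
        (fun d pt => items_insert_insL ..) PySem.Dict.empty
    rw [hbridge]
    have := foldl_insL_fresh
        (fun pt => if pt.1 ∈ PySem.Set.ofList ((tps.filter (fun tp => decide (tp.1 = P))).map Prod.snd)
          then P else pt.2)
        ((tps.filter (fun tp => decide (tp.1 ≠ P))).map (fun tp => (tp.2, tp.1)))
        [] (by simpa [hnpfst] using hpre)
    simpa using this
  rw [hB1, foldl_skip_or_append P _ _ (PySem.Set.nodup_ofList _)]
  have hbk : (((tps.filter (fun tp => decide (tp.1 ≠ P))).map (fun tp => (tp.2, tp.1))).map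
        (fun pt => ((pt.1,
          if pt.1 ∈ PySem.Set.ofList ((tps.filter (fun tp => decide (tp.1 = P))).map Prod.snd)
          then P else pt.2) : String × String))).map Prod.fst
      = ((tps.filter (fun tp => decide (tp.1 ≠ P))).map (fun tp => (tp.2, tp.1))).map Prod.fst := by
    rw [List.map_map]; rfl
  simp only [hbk]
  congr 1
  apply List.map_congr_left
  intro p _
  by_cases hm : p.1 ∈ (tps.filter (fun tp => decide (tp.1 = P))).map Prod.snd
  · simp [hm, PySem.Set.mem_ofList]
  · simp [hm, PySem.Set.mem_ofList]
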